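-- pv_equiv track=rewrite | github.com/atulgupta-372/atulgupta-372 | correctPath.py | CorrectPath
-- ===== SOURCE A (Python) =====
-- def CorrectPath(strParam):
--   str1=strParam
--   rcount,lcount,ucount,dcount=str1.count("r"),str1.count("l"),str1.count("u"),str1.count("d")
--   quest=str1.count("?")
--   rinc,linc,dinc,uinc=0,0,0,0
--   if rcount-lcount <=4:
--     rinc=4-(rcount-lcount)
--   else:
--     linc=(rcount-lcount)-4
--   if dcount-ucount <=4:
--     dinc=4-(dcount-ucount)
--   else:
--     uinc=(dcount-ucount)-4
--
--   inc=quest-(rinc+linc+dinc+uinc)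
--   uinc+=int(inc/2)
--   dinc+=int(inc/2)
--
--   str2=""
--   for i in str1:
--     if i=="?":
--       if rinc>0:
--         str2+="r"
--         rinc-=1
--       elif linc>0:
--         str2+="l"
--         linc-=1
--       elif uinc>0:
--         str2+="u"
--         uinc-=1
--       elif dinc>0:
--         str2+="d"
--         dinc-=1
--     else:
--       str2+=i
--
--
--   return str2
-- ===== SOURCE B (Python) =====
-- def CorrectPath(strParam):
--   parts = strParam.split('?')
--   tally = {}
--   for seg in parts:
--     for ch in seg:
--       tally[ch] = tally.get(ch, 0) + 1
--   rl = tally.get('r', 0) - tally.get('l', 0)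
--   du = tally.get('d', 0) - tally.get('u', 0)
--   quest = len(parts) - 1
--   if rl <= 4:
--     rinc, linc = 4 - rl, 0
--   else:
--     rinc, linc = 0, rl - 4
--   if du <= 4:
--     dinc, uinc = 4 - du, 0
--   else:
--     uinc, dinc = du - 4, 0
--   half = int((quest - (rinc + linc + dinc + uinc)) / 2)
--   uinc += half
--   dinc += half
--   fills = ['r'] * rinc + ['l'] * linc + ['u'] * uinc + ['d'] * dinc
--   fills = (fills + [''] * quest)[:quest]
--   pieces = [parts[0]]
--   for f, seg in zip(fills, parts[1:]):
--     pieces.append(f)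
--     pieces.append(seg)
--   return ''.join(pieces)
-- ===== Notes on version B (the rewrite author's own statement) =====
-- stated objective: alternative
-- what changed: B splits the string on '?' into segments, counts letters with one dict tally over the segments, and rebuilds the result by zipping the padded replacement list with the segments and joining, instead of A's single character scan that consumes four decrementing counters through a four-way priority branch.
import Mathlib
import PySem

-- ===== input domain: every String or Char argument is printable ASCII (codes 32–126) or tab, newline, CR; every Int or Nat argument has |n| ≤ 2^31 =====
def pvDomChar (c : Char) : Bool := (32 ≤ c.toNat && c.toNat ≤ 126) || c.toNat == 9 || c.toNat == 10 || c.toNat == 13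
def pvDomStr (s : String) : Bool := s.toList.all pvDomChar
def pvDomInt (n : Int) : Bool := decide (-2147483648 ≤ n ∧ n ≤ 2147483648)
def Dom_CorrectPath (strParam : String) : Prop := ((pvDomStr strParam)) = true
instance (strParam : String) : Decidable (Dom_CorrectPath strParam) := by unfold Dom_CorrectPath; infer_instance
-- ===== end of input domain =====

-- B replaces A's single char scan with four decrementing counters and a four-way priority
-- branch by a split-on-'?' / dict-tally / zip-interleave decomposition (alternative, same cost).

-- ===== PORT A =====
-- A's for-loop over str1 with the four counters and the growing str2 accumulator.
def pvLoopA : List Char → Int → Int → Int → Int → List Char → List Char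
  | [], _, _, _, _, acc => acc
  | c :: cs, r, l, u, d, acc =>
    if c = '?' then
      if r > 0 then pvLoopA cs (r - 1) l u d (acc ++ ['r'])
      else if l > 0 then pvLoopA cs r (l - 1) u d (acc ++ ['l'])
      else if u > 0 then pvLoopA cs r l (u - 1) d (acc ++ ['u'])
      else if d > 0 then pvLoopA cs r l u (d - 1) (acc ++ ['d'])
      else pvLoopA cs r l u d acc
    else pvLoopA cs r l u d (acc ++ [c])

def CorrectPath (strParam : String) : String :=
  let str1 := strParam
  let rcount : Int := PySem.Str.count str1 "r"
  let lcount : Int := PySem.Str.count str1 "l"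
  let ucount : Int := PySem.Str.count str1 "u"
  let dcount : Int := PySem.Str.count str1 "d"
  let quest : Int := PySem.Str.count str1 "?"
  let rinc : Int := if rcount - lcount ≤ 4 then 4 - (rcount - lcount) else 0
  let linc : Int := if rcount - lcount ≤ 4 then 0 else (rcount - lcount) - 4
  let dinc : Int := if dcount - ucount ≤ 4 then 4 - (dcount - ucount) else 0
  let uinc : Int := if dcount - ucount ≤ 4 then 0 else (dcount - ucount) - 4
  let inc : Int := quest - (rinc + linc + dinc + uinc)
  -- int(inc/2) truncates toward zero: Int.tdiv is exact here
  let uinc := uinc + Int.tdiv inc 2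
  let dinc := dinc + Int.tdiv inc 2
  String.ofList (pvLoopA str1.toList rinc linc uinc dinc [])

-- ===== PORT B =====
def CorrectPath_alt (strParam : String) : String :=
  -- parts = strParam.split('?')
  let parts := PySem.Chars.splitOn strParam.toList ['?']
  -- tally[ch] = tally.get(ch, 0) + 1 over every char of every segment
  let tally := parts.foldl
    (fun d seg => seg.foldl (fun d ch => d.insert ch (d.getD ch 0 + 1)) d)
    (PySem.Dict.empty : PySem.Dict Char Int)
  let rl : Int := tally.getD 'r' 0 - tally.getD 'l' 0
  let du : Int := tally.getD 'd' 0 - tally.getD 'u' 0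
  let quest : Int := (parts.length : Int) - 1
  let rinc : Int := if rl ≤ 4 then 4 - rl else 0
  let linc : Int := if rl ≤ 4 then 0 else rl - 4
  let dinc : Int := if du ≤ 4 then 4 - du else 0
  let uinc : Int := if du ≤ 4 then 0 else du - 4
  -- half = int((quest - (rinc+linc+dinc+uinc)) / 2), truncation toward zero
  let half : Int := Int.tdiv (quest - (rinc + linc + dinc + uinc)) 2
  let uinc := uinc + half
  let dinc := dinc + half
  -- fills = ['r']*rinc + ['l']*linc + ['u']*uinc + ['d']*dinc, padded with '' and cut to quest
  let fills : List (List Char) :=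
    List.replicate rinc.toNat ['r'] ++ List.replicate linc.toNat ['l'] ++
    List.replicate uinc.toNat ['u'] ++ List.replicate dinc.toNat ['d']
  let fills := (fills ++ List.replicate quest.toNat []).take quest.toNat
  -- pieces = [parts[0]] then f, seg for each zipped pair; return ''.join(pieces)
  match parts with
  | [] => ""   -- unreachable: str.split always returns at least one part
  | p0 :: rest =>
    String.ofList ((fills.zip rest).foldl (fun acc fs => acc ++ fs.1 ++ fs.2) p0)

-- ===== PRECONDITION & SPEC =====
def Spec_CorrectPath (strParam : String) (out : String) : Prop := out = CorrectPath_alt strParam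
instance (strParam : String) (out : String) : Decidable (Spec_CorrectPath strParam out) := by unfold Spec_CorrectPath; infer_instance

-- ===== CLAIM (what is proved, stated in full; the proofs are below) =====
def Claim_equal_CorrectPath : Prop := ∀ (strParam : String), Dom_CorrectPath strParam → Spec_CorrectPath strParam (CorrectPath strParam)

-- ===== LEMMAS AND PROOFS =====

-- "c"*n for a possibly negative Int n (proof-side abbreviation)
def pvRep (c : Char) (n : Int) : List Char := List.replicate n.toNat c

-- proof-side model of A's '?' consumption: the k-th '?' takes the k-th fill char
def pvLoopB : List Char → List Char → List Char → List Char
  | [], _, acc => acc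
  | c :: cs, fills, acc =>
    if c = '?' then
      match fills with
      | f :: fs => pvLoopB cs fs (acc ++ [f])
      | [] => pvLoopB cs [] acc
    else pvLoopB cs fills (acc ++ [c])

theorem pvRep_pos (c : Char) (n : Int) (h : 0 < n) : pvRep c n = c :: pvRep c (n - 1) := by
  have h : n.toNat = (n - 1).toNat + 1 := by omega
  unfold pvRep
  rw [h, List.replicate_succ]

theorem pvRep_nonpos (c : Char) (n : Int) (h : n ≤ 0) : pvRep c n = [] := by
  have : n.toNat = 0 := by omega
  simp [pvRep, this]

-- invariant: A's four counters correspond to the remaining fill sequence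
theorem pvLoop_eq : ∀ (cs : List Char) (r l u d : Int) (acc : List Char),
    pvLoopA cs r l u d acc
      = pvLoopB cs (pvRep 'r' r ++ pvRep 'l' l ++ pvRep 'u' u ++ pvRep 'd' d) acc := by
  intro cs
  induction cs with
  | nil => intro r l u d acc; rfl
  | cons c cs ih =>
    intro r l u d acc
    by_cases hc : c = '?'
    · subst hc
      rcases lt_or_ge 0 r with hr | hr
      · rw [pvRep_pos _ _ hr]
        simp only [pvLoopA, pvLoopB, reduceIte, if_pos hr, List.cons_append]
        exact ih (r - 1) l u d (acc ++ ['r'])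
      · rw [pvRep_nonpos _ r (by omega)]
        rcases lt_or_ge 0 l with hl | hl
        · rw [pvRep_pos _ _ hl]
          simp only [pvLoopA, pvLoopB, reduceIte, if_neg (by omega : ¬ r > 0), if_pos hl,
            List.nil_append, List.cons_append]
          have h := ih r (l - 1) u d (acc ++ ['l'])
          rw [pvRep_nonpos 'r' r (by omega), List.nil_append] at h
          exact h
        · rw [pvRep_nonpos _ l (by omega)]
          rcases lt_or_ge 0 u with hu | hu
          · rw [pvRep_pos _ _ hu]
            simp only [pvLoopA, pvLoopB, reduceIte, if_neg (by omega : ¬ r > 0),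
              if_neg (by omega : ¬ l > 0), if_pos hu, List.nil_append, List.cons_append]
            have h := ih r l (u - 1) d (acc ++ ['u'])
            rw [pvRep_nonpos 'r' r (by omega), pvRep_nonpos 'l' l (by omega),
              List.nil_append, List.nil_append] at h
            exact h
          · rw [pvRep_nonpos _ u (by omega)]
            rcases lt_or_ge 0 d with hd | hd
            · rw [pvRep_pos _ _ hd]
              simp only [pvLoopA, pvLoopB, reduceIte, if_neg (by omega : ¬ r > 0),
                if_neg (by omega : ¬ l > 0), if_neg (by omega : ¬ u > 0), if_pos hd,
                List.nil_append]
              have h := ih r l u (d - 1) (acc ++ ['d'])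
              rw [pvRep_nonpos 'r' r (by omega), pvRep_nonpos 'l' l (by omega),
                pvRep_nonpos 'u' u (by omega), List.nil_append, List.nil_append,
                List.nil_append] at h
              exact h
            · rw [pvRep_nonpos _ d (by omega)]
              simp only [pvLoopA, pvLoopB, reduceIte, if_neg (by omega : ¬ r > 0),
                if_neg (by omega : ¬ l > 0), if_neg (by omega : ¬ u > 0),
                if_neg (by omega : ¬ d > 0), List.nil_append]
              have h := ih r l u d acc
              rw [pvRep_nonpos 'r' r (by omega), pvRep_nonpos 'l' l (by omega),
                pvRep_nonpos 'u' u (by omega), pvRep_nonpos 'd' d (by omega),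
                List.nil_append, List.nil_append, List.nil_append] at h
              exact h
    · simp only [pvLoopA, pvLoopB, if_neg hc]
      exact ih r l u d (acc ++ [c])

-- simple structural model of s.split('?') : (first segment, later segments)
def pvSplitQ : List Char → List Char × List (List Char)
  | [] => ([], [])
  | c :: cs =>
    let p := pvSplitQ cs
    if c = '?' then ([], p.1 :: p.2) else (c :: p.1, p.2)

theorem pvSplit_go (l : List Char) : ∀ (fuel : Nat) (cur : List Char) (acc : List (List Char)),
    l.length ≤ fuel →
    PySem.Chars.splitOn.go ['?'] fuel l cur acc
      = acc.reverse ++ (cur.reverse ++ (pvSplitQ l).1) :: (pvSplitQ l).2 := by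
  induction l with
  | nil =>
    intro fuel cur acc _
    cases fuel <;> simp [PySem.Chars.splitOn.go, pvSplitQ]
  | cons c cs ih =>
    intro fuel cur acc h
    cases fuel with
    | zero => simp at h
    | succ f =>
      rw [PySem.Chars.splitOn.go]
      by_cases hc : c = '?'
      · subst hc
        simp only [List.isPrefixOf, beq_self_eq_true, Bool.true_and, if_pos,
          List.length_singleton, List.drop_succ_cons, List.drop_zero]
        rw [ih f [] (cur.reverse :: acc) (by simpa using Nat.le_of_succ_le_succ h)]
        simp [pvSplitQ]
      · have hp : (['?'].isPrefixOf (c :: cs)) = false := by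
          simp [List.isPrefixOf]
          exact fun h' => hc h'.symm
        simp only [hp, Bool.false_eq_true, if_false]
        rw [ih f (c :: cur) acc (Nat.le_of_succ_le_succ h)]
        simp [pvSplitQ, hc, List.append_assoc]

theorem pvSplitOn_eq (cs : List Char) :
    PySem.Chars.splitOn cs ['?'] = (pvSplitQ cs).1 :: (pvSplitQ cs).2 := by
  have := pvSplit_go cs (cs.length + 1) [] [] (by omega)
  simpa [PySem.Chars.splitOn] using this

theorem pvCount_go (c : Char) : ∀ (l : List Char) (fuel acc : Nat),
    l.length ≤ fuel →
    PySem.Chars.count.go [c] fuel l acc = acc + l.count c := by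
  intro l
  induction l with
  | nil => intro fuel acc _; cases fuel <;> simp [PySem.Chars.count.go]
  | cons b bs ih =>
    intro fuel acc h
    cases fuel with
    | zero => simp at h
    | succ f =>
      rw [PySem.Chars.count.go]
      by_cases hc : c = b
      · subst hc
        simp only [List.isPrefixOf, beq_self_eq_true, Bool.true_and, if_pos,
          List.length_singleton, List.drop_succ_cons, List.drop_zero]
        rw [ih f (acc + 1) (Nat.le_of_succ_le_succ h)]
        simp
        omega
      · have hp : ([c].isPrefixOf (b :: bs)) = false := by
          simp [List.isPrefixOf]
          exact fun h' => hc h'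
        simp only [hp, Bool.false_eq_true, if_false]
        rw [ih f acc (Nat.le_of_succ_le_succ h)]
        simp [Ne.symm hc]

theorem pvCount_single (cs : List Char) (c : Char) :
    PySem.Chars.count cs [c] = cs.count c := by
  have := pvCount_go c cs cs.length 0 (le_refl _)
  simpa [PySem.Chars.count] using this

theorem pvSplitQ_flatten (cs : List Char) :
    (pvSplitQ cs).1 ++ (pvSplitQ cs).2.flatten = cs.filter (fun x => !(x == '?')) := by
  induction cs with
  | nil => rfl
  | cons c cs ih =>
    by_cases hc : c = '?' <;> simp [pvSplitQ, hc, ← ih]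

theorem pvSplitQ_len (cs : List Char) : (pvSplitQ cs).2.length = cs.count '?' := by
  induction cs with
  | nil => rfl
  | cons c cs ih =>
    by_cases hc : c = '?' <;> simp [pvSplitQ, hc, ih]

-- the nested tally loop counts occurrences in the concatenation of the parts
theorem pvTally_getD (parts : List (List Char)) (d : PySem.Dict Char Int) (c : Char) :
    (parts.foldl (fun d seg => seg.foldl (fun d ch => d.insert ch (d.getD ch 0 + 1)) d) d).getD c 0
      = d.getD c 0 + parts.flatten.count c := by
  induction parts generalizing d with
  | nil => simp
  | cons seg parts ih =>
    simp only [List.foldl_cons, List.flatten_cons, List.count_append]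
    rw [ih, PySem.Dict.getD_foldl_insert_add_one]
    push_cast
    ring

-- the interleaving that B's zip/foldl builds
def pvIntlv : List (List Char) → List (List Char) → List Char
  | t0 :: t, f0 :: f => f0 ++ t0 ++ pvIntlv t f
  | _, _ => []

theorem pvFold_zip : ∀ (fs ts : List (List Char)) (a : List Char),
    (fs.zip ts).foldl (fun acc p => acc ++ p.1 ++ p.2) a = a ++ pvIntlv ts fs := by
  intro fs
  induction fs with
  | nil => intro ts a; cases ts <;> simp [pvIntlv]
  | cons f fs ih =>
    intro ts a
    cases ts with
    | nil => simp [pvIntlv]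
    | cons t ts =>
      simp only [List.zip_cons_cons, List.foldl_cons]
      rw [ih ts (a ++ f ++ t)]
      simp [pvIntlv, List.append_assoc]

theorem pvLoopB_acc : ∀ (cs fs acc : List Char),
    pvLoopB cs fs acc = acc ++ pvLoopB cs fs [] := by
  intro cs
  induction cs with
  | nil => intro fs acc; simp [pvLoopB]
  | cons c cs ih =>
    intro fs acc
    by_cases hc : c = '?'
    · subst hc
      cases fs with
      | nil =>
        simp only [pvLoopB, reduceIte]
        exact ih [] acc
      | cons f fs' =>
        simp only [pvLoopB, reduceIte]
        rw [ih fs' (acc ++ [f]), ih fs' ([] ++ [f])]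
        simp
    · simp only [pvLoopB, if_neg hc]
      rw [ih fs (acc ++ [c]), ih fs ([] ++ [c])]
      simp

theorem pvPadTake_irrel (xs : List (List Char)) (n m : Nat) (h : n ≤ m) :
    (xs ++ List.replicate m ([] : List Char)).take n
      = (xs ++ List.replicate n ([] : List Char)).take n := by
  by_cases hle : n ≤ xs.length
  · rw [List.take_append_of_le_length hle, List.take_append_of_le_length hle]
  · rw [List.take_append, List.take_append, List.take_replicate, List.take_replicate,
      min_eq_left (by omega : n - xs.length ≤ m), min_eq_left (by omega : n - xs.length ≤ n)]

-- main bridge: consuming fills at each '?' = interleaving the '?'-split parts with the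
-- padded-and-truncated fill list
theorem pvMain (cs : List Char) : ∀ (fs : List Char),
    pvLoopB cs fs []
      = (pvSplitQ cs).1 ++ pvIntlv (pvSplitQ cs).2
          ((fs.map (fun c => [c]) ++ List.replicate (pvSplitQ cs).2.length ([] : List Char)).take
            (pvSplitQ cs).2.length) := by
  induction cs with
  | nil => intro fs; simp [pvLoopB, pvSplitQ, pvIntlv]
  | cons c cs ih =>
    intro fs
    by_cases hc : c = '?'
    · subst hc
      cases fs with
      | nil =>
        simp only [pvLoopB, reduceIte]
        rw [ih []]
        simp [pvSplitQ, reduceIte, pvIntlv, List.replicate_succ, List.take_succ_cons]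
      | cons f fs' =>
        simp only [pvLoopB, reduceIte, List.nil_append]
        rw [pvLoopB_acc cs fs' [f], ih fs']
        simp only [pvSplitQ, reduceIte, List.map_cons, List.cons_append, List.length_cons,
          List.take_succ_cons, pvIntlv, List.nil_append]
        rw [pvPadTake_irrel (fs'.map (fun c => [c])) (pvSplitQ cs).2.length
          ((pvSplitQ cs).2.length + 1) (by omega)]
    · simp only [pvLoopB, if_neg hc, List.nil_append]
      rw [pvLoopB_acc cs fs [c], ih fs]
      simp [pvSplitQ, hc]

-- ===== VERDICT (by name: the statement is the Claim_ definition above) =====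
theorem pvDictEmpty_getD (c : Char) : (PySem.Dict.empty : PySem.Dict Char Int).getD c 0 = 0 := by
  simp [pysem]

theorem CorrectPath_spec : Claim_equal_CorrectPath := by
  intro s _
  unfold Spec_CorrectPath
  have hflat : ∀ c : Char, (c == '?') = false →
      (((pvSplitQ s.toList).1 :: (pvSplitQ s.toList).2).flatten).count c = s.toList.count c := by
    intro c hc
    rw [List.flatten_cons, pvSplitQ_flatten]
    exact List.count_filter (by simp [hc])
  simp only [CorrectPath, CorrectPath_alt, pvSplitOn_eq, PySem.Str.count_eq]
  rw [pvTally_getD, pvTally_getD, pvTally_getD, pvTally_getD]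
  rw [hflat 'r' rfl, hflat 'l' rfl, hflat 'u' rfl, hflat 'd' rfl]
  rw [show ("r" : String).toList = ['r'] from rfl, show ("l" : String).toList = ['l'] from rfl,
    show ("u" : String).toList = ['u'] from rfl, show ("d" : String).toList = ['d'] from rfl,
    show ("?" : String).toList = ['?'] from rfl]
  rw [pvCount_single, pvCount_single, pvCount_single, pvCount_single, pvCount_single]
  rw [pvDictEmpty_getD, pvLoop_eq, pvMain, pvFold_zip]
  rw [← pvSplitQ_len]
  simp only [List.length_cons, pvRep, List.map_append, List.map_replicate]
  norm_num
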